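-- pv_equiv track=rewrite | github.com/alumnos-ingcom/python-1-Agustina-Bover | src/ejercicio4.py | suma_lenta
-- ===== SOURCE A (Python) =====
-- def suma_lenta (numero1, numero2):
--     """
--     Esta funcion realiza la suma lenta tanto para numeros
--     positivos como negativos
--     """
--     contador=0
--     resultado=numero1
--     print (numero1)
--     while contador<abs(numero2):
--         if numero2>0:
--             print ('+1')
--             resultado+=1
--             contador+=1
--         else:
--             print ('-1')
--             resultado-=1
--             contador+=1
--     return resultado
-- ===== SOURCE B (Python) =====
-- def suma_lenta(numero1, numero2):
--     """Closed-form slow sum: decide the sign once, print the fixed step line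
--     abs(numero2) times, and compute the result arithmetically."""
--     print(numero1)
--     n = abs(numero2)
--     if numero2 > 0:
--         step, line = 1, '+1'
--     else:
--         step, line = -1, '-1'
--     for _ in range(n):
--         print(line)
--     return numero1 + step * n
-- ===== Notes on version B (the rewrite author's own statement) =====
-- stated objective: simpler
-- what changed: B hoists the sign decision out of the loop and computes the return value by the closed form numero1 + step*abs(numero2) instead of per-iteration accumulation in a counter-guarded while loop.
import Mathlib
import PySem

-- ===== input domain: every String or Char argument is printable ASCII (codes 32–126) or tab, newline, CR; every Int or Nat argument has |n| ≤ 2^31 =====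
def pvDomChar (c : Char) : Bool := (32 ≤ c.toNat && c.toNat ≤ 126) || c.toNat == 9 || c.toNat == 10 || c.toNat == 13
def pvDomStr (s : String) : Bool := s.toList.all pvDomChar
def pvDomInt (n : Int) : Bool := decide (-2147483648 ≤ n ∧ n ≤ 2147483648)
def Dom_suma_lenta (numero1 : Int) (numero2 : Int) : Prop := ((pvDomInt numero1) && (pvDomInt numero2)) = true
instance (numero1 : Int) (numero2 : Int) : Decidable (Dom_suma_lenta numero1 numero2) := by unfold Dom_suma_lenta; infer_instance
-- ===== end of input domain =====

-- B hoists the sign decision out of the loop and returns numero1 + step*abs(numero2)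
-- in closed form instead of accumulating step by step (simpler; return value only —
-- both programs also print, which is not modelled here).

-- ===== PORT A =====
-- the while loop of A: state (contador, resultado), branch on numero2>0 each iteration
def sumaLentaGo (numero2 : Int) (contador : Int) (resultado : Int) : Int :=
  if contador < |numero2| then
    if numero2 > 0 then
      sumaLentaGo numero2 (contador + 1) (resultado + 1)
    else
      sumaLentaGo numero2 (contador + 1) (resultado - 1)
  else
    resultado
termination_by (|numero2| - contador).toNat
decreasing_by all_goals omega

def suma_lenta (numero1 : Int) (numero2 : Int) : Int :=
  sumaLentaGo numero2 0 numero1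

-- ===== PORT B =====
def suma_lenta_alt (numero1 : Int) (numero2 : Int) : Int :=
  let n := |numero2|
  let step : Int := if numero2 > 0 then 1 else -1
  numero1 + step * n

-- ===== PRECONDITION & SPEC =====
def Spec_suma_lenta (numero1 : Int) (numero2 : Int) (out : Int) : Prop := out = suma_lenta_alt numero1 numero2
instance (numero1 : Int) (numero2 : Int) (out : Int) : Decidable (Spec_suma_lenta numero1 numero2 out) := by unfold Spec_suma_lenta; infer_instance

-- ===== CLAIM (what is proved, stated in full; the proofs are below) =====
def Claim_equal_suma_lenta : Prop := ∀ (numero1 : Int) (numero2 : Int), Dom_suma_lenta numero1 numero2 → Spec_suma_lenta numero1 numero2 (suma_lenta numero1 numero2)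

-- ===== LEMMAS AND PROOFS =====
theorem sumaLentaGo_eq (numero2 : Int) :
    ∀ (k : Nat) (contador resultado : Int), (|numero2| - contador).toNat = k →
      sumaLentaGo numero2 contador resultado =
        resultado + (if numero2 > 0 then (1 : Int) else -1) * (|numero2| - contador).toNat := by
  intro k
  induction k with
  | zero =>
    intro contador resultado hk
    rw [sumaLentaGo]
    have hnot : ¬ contador < |numero2| := by omega
    simp [hnot, hk]
  | succ k ih =>
    intro contador resultado hk
    rw [sumaLentaGo]
    have hlt : contador < |numero2| := by omega
    have hk' : (|numero2| - (contador + 1)).toNat = k := by omega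
    by_cases hp : numero2 > 0
    · simp only [hlt, if_pos, hp, if_pos]
      rw [ih (contador + 1) (resultado + 1) hk']
      simp [hp, hk, hk']
      omega
    · simp only [hlt, if_pos, hp, if_false]
      rw [ih (contador + 1) (resultado - 1) hk']
      simp [hp, hk, hk']
      omega

-- ===== VERDICT (by name: the statement is the Claim_ definition above) =====
theorem suma_lenta_spec : Claim_equal_suma_lenta := by
  intro numero1 numero2 _
  unfold Spec_suma_lenta suma_lenta suma_lenta_alt
  rw [sumaLentaGo_eq numero2 (|numero2| - 0).toNat 0 numero1 rfl]
  by_cases hp : numero2 > 0 <;> simp [hp]
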